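-- pv_equiv track=rewrite | github.com/blossom22/11_Inflearn_Algorithm | 6_greedy_4.py | solution
-- ===== SOURCE A (Python) =====
-- def solution(nums, k):
--     hap = sum(nums)
--     m = len(nums)-k     # 부분수열 하나의 크기
--     score = 0
--     # 아래의 for문은 맨초기의 부분수열의 합(score)을 구하는 것
--     for i in range(m):
--         score += nums[i]
--     minS = score
--     # left는 부분수열의 시작위치, right는 부분수열 끝위치의+1을 지정한다.(nums[right]를 새롭게 더하고, nums[left]는 빼주면 새로운 부분수열의 합을 구할 수 있다)
--     left = 0
--     for right in range(m,len(nums)):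
--         score += (nums[right] - nums[left])
--         left+=1     # 구했으면 left+=1해서 다음 부분수열로 넘어가야지
--         minS = min(minS, score)     # 구한 score들 중 최소값을 minS로 저장한다
--     return hap - minS               # hap에서 minS(부분수열합의 최소값)를 뺀 값이 최대점수이다.
-- ===== SOURCE B (Python) =====
-- def solution(nums, k):
--     # prefix-sum table: prefix[i] = sum of nums[:i]
--     prefix = [0]
--     acc = 0
--     for x in nums:
--         acc += x
--         prefix.append(acc)
--     m = len(nums) - k
--     minS = min(prefix[i + m] - prefix[i] for i in range(k + 1))
--     return prefix[-1] - minS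
-- ===== Notes on version B (the rewrite author's own statement) =====
-- stated objective: alternative
-- what changed: B precomputes a prefix-sum table once and finds the minimum removable window by subtracting two table entries per candidate, replacing A's running sliding-window add-one/drop-one update with two extra index variables.
import Mathlib
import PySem

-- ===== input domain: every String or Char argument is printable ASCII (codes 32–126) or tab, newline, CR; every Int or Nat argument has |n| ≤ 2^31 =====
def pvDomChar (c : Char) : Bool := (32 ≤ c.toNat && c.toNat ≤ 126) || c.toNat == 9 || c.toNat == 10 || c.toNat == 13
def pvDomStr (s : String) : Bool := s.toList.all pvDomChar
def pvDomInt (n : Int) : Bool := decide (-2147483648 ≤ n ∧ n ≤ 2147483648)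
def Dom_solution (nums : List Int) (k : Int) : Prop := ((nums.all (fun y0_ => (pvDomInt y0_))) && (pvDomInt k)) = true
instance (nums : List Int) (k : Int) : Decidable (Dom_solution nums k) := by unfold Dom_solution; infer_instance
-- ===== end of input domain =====

-- B replaces A's sliding add-one/drop-one window update by a precomputed prefix-sum table
-- scanned by subtraction (alternative decomposition, same O(n) cost).


-- ===== PORT A =====
def solution (nums : List Int) (k : Int) : Int :=
  let hap := nums.sum
  let m : Int := (nums.length : Int) - k
  let score := (PySem.List.pyRange 0 m 1).foldl
    (fun s i => s + PySem.List.pyGetD nums i 0) 0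
  let st := (PySem.List.pyRange m (nums.length : Int) 1).foldl
    (fun (st : Int × Int × Int) right =>
      let score := st.1 + (PySem.List.pyGetD nums right 0 - PySem.List.pyGetD nums st.2.1 0)
      let left := st.2.1 + 1
      (score, left, min st.2.2 score))
    (score, 0, score)
  hap - st.2.2

-- ===== PORT B =====
def solution_alt (nums : List Int) (k : Int) : Int :=
  let st := nums.foldl
    (fun (st : List Int × Int) x =>
      let acc := st.2 + x
      (st.1 ++ [acc], acc)) ([0], 0)
  let pfx := st.1
  let m : Int := (nums.length : Int) - k
  match PySem.List.min?
      ((PySem.List.pyRange 0 (k + 1) 1).map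
        (fun i => PySem.List.pyGetD pfx (i + m) 0 - PySem.List.pyGetD pfx i 0))
      (fun v => v) with
  | some minS => PySem.List.pyGetD pfx (-1) 0 - minS
  | none => 0   -- min() of an empty generator raises ValueError (k < 0, excluded by Pre_)

-- ===== PRECONDITION & SPEC =====
-- A raises IndexError for every k < 0 (first loop runs past the end) and for every
-- k > len(nums) (second loop's left index runs past the end); Pre_ admits exactly
-- the inputs on which A returns normally.
def Pre_solution (nums : List Int) (k : Int) : Prop := 0 ≤ k ∧ k ≤ (nums.length : Int)
instance (nums : List Int) (k : Int) : Decidable (Pre_solution nums k) := by unfold Pre_solution; infer_instance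
def pvWitness_solution : List Int × Int := ([3, -1, 4, 1, -5], 2)

def Spec_solution (nums : List Int) (k : Int) (out : Int) : Prop := out = solution_alt nums k
instance (nums : List Int) (k : Int) (out : Int) : Decidable (Spec_solution nums k out) := by unfold Spec_solution; infer_instance

-- ===== CLAIM (what is proved, stated in full; the proofs are below) =====
def Claim_equal_solution : Prop := ∀ (nums : List Int) (k : Int), Dom_solution nums k → Pre_solution nums k → Spec_solution nums k (solution nums k)

-- ===== LEMMAS AND PROOFS =====

-- prefix sum of the first i elements
def pref (nums : List Int) (i : Nat) : Int := (nums.take i).sum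
-- sum of the length-M window starting at j
def wsum (nums : List Int) (M j : Nat) : Int := pref nums (j + M) - pref nums j
-- running minimum of window sums for starts 0..t
def runMin (nums : List Int) (M : Nat) : Nat → Int
  | 0 => wsum nums M 0
  | t + 1 => min (runMin nums M t) (wsum nums M (t + 1))

lemma pref_succ (nums : List Int) (i : Nat) (h : i < nums.length) :
    pref nums (i + 1) = pref nums i + nums.getD i 0 := by
  unfold pref
  rw [List.sum_take_succ _ i h]
  congr 1
  simp [List.getD, List.getElem?_eq_getElem h]

lemma sum_getD_range (nums : List Int) : ∀ (M : Nat), M ≤ nums.length →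
    ((List.range M).map (fun j => nums.getD j 0)).sum = pref nums M := by
  intro M
  induction M with
  | zero => simp [pref]
  | succ t ih =>
    intro h
    rw [List.range_succ]
    simp only [List.map_append, List.sum_append, List.map_cons, List.map_nil, List.sum_cons,
      List.sum_nil]
    rw [ih (by omega), pref_succ nums t (by omega)]
    ring

lemma loopA_inv (nums : List Int) (M : Nat) : ∀ (c : Nat), M + c ≤ nums.length →
    ((List.range c).map (fun (j : Nat) => ((M : Int) + (j : Int)))).foldl
      (fun (st : Int × Int × Int) right =>
        let score := st.1 + (PySem.List.pyGetD nums right 0 - PySem.List.pyGetD nums st.2.1 0)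
        let left := st.2.1 + 1
        (score, left, min st.2.2 score))
      (pref nums M, 0, pref nums M)
    = (wsum nums M c, (c : Int), runMin nums M c) := by
  intro c
  induction c with
  | zero => intro _; simp [wsum, runMin, pref]
  | succ t ih =>
    intro h
    rw [List.range_succ, List.map_append, List.foldl_append, ih (by omega)]
    simp only [List.map_cons, List.map_nil, List.foldl_cons, List.foldl_nil]
    have h1 : ((M : Int) + (t : Int)) = ((M + t : Nat) : Int) := by push_cast; ring
    have h2 : wsum nums M t + (nums.getD (M + t) 0 - nums.getD t 0) = wsum nums M (t + 1) := by
      simp only [wsum]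
      rw [show t + 1 + M = (t + M) + 1 by ring, pref_succ nums (t + M) (by omega),
        pref_succ nums t (by omega), show t + M = M + t by ring]
      ring
    simp only [h1, PySem.List.pyGetD_natCast, h2, runMin]
    push_cast
    rfl

lemma buildPrefix (nums : List Int) : ∀ (p0 : List Int) (a0 : Int),
    nums.foldl (fun (st : List Int × Int) x => (st.1 ++ [st.2 + x], st.2 + x)) (p0, a0)
    = (p0 ++ (List.range nums.length).map (fun i => a0 + (nums.take (i + 1)).sum),
       a0 + nums.sum) := by
  induction nums with
  | nil => intro p0 a0; simp
  | cons y ys ih =>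
    intro p0 a0
    simp only [List.foldl_cons]
    rw [ih]
    simp only [Prod.mk.injEq]
    constructor
    · rw [List.append_assoc]
      congr 1
      rw [List.length_cons, List.range_succ_eq_map, List.map_cons, List.map_map]
      simp only [List.take_succ_cons, List.take_zero, List.sum_cons, List.sum_nil, add_zero]
      rw [List.singleton_append]
      congr 1
      refine List.map_congr_left (fun i _ => ?_)
      simp only [Function.comp_apply, Nat.succ_eq_add_one]
      ring
    · simp [add_assoc]

lemma prefix_eq (nums : List Int) :
    (nums.foldl (fun (st : List Int × Int) x => (st.1 ++ [st.2 + x], st.2 + x)) ([0], 0)).1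
    = (List.range (nums.length + 1)).map (pref nums) := by
  rw [buildPrefix]
  dsimp only
  rw [List.range_succ_eq_map, List.map_cons, List.map_map]
  rw [show ((0 : Int) :: []) = [pref nums 0] from by simp [pref]]
  rw [List.singleton_append]
  congr 1
  refine List.map_congr_left (fun i _ => ?_)
  simp [Function.comp, pref]

lemma runMin_fold (nums : List Int) (M : Nat) : ∀ (t : Nat),
    ((List.range t).map (fun j => wsum nums M (j + 1))).foldl min (wsum nums M 0)
    = runMin nums M t := by
  intro t
  induction t with
  | zero => simp [runMin]
  | succ s ih =>
    rw [List.range_succ, List.map_append, List.foldl_append, ih]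
    simp [runMin]

lemma solution_eq (nums : List Int) (K : Nat) (h : K ≤ nums.length) :
    solution nums (K : Int)
    = pref nums nums.length - runMin nums (nums.length - K) K := by
  have hM : (nums.length : Int) - (K : Int) = ((nums.length - K : Nat) : Int) := by omega
  simp only [solution]
  rw [hM]
  rw [PySem.List.pyRange_zero_nat (nums.length - K)]
  rw [List.foldl_map]
  have hscore : (List.range (nums.length - K)).foldl
      (fun s (j : Nat) => s + PySem.List.pyGetD nums (j : Int) 0) 0
      = pref nums (nums.length - K) := by
    simp only [PySem.List.pyGetD_natCast]
    rw [PySem.List.foldl_add _ (fun j : Nat => nums.getD j 0) 0]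
    rw [sum_getD_range nums (nums.length - K) (by omega)]
    ring
  rw [hscore]
  rw [PySem.List.pyRange_one ((nums.length - K : Nat) : Int) (nums.length : Int)]
  rw [show ((nums.length : Int) - ((nums.length - K : Nat) : Int)).toNat = K by omega]
  rw [loopA_inv nums (nums.length - K) K (by omega)]
  have hsum : nums.sum = pref nums nums.length := by
    simp [pref]
  rw [hsum]

lemma solution_alt_eq (nums : List Int) (K : Nat) (h : K ≤ nums.length) :
    solution_alt nums (K : Int)
    = pref nums nums.length - runMin nums (nums.length - K) K := by
  have hM : (nums.length : Int) - (K : Int) = ((nums.length - K : Nat) : Int) := by omega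
  simp only [solution_alt]
  rw [prefix_eq, hM]
  rw [show (K : Int) + 1 = ((K + 1 : Nat) : Int) by push_cast; ring]
  rw [PySem.List.pyRange_zero_nat (K + 1), List.map_map]
  have hlist : (List.range (K + 1)).map
      ((fun i => PySem.List.pyGetD ((List.range (nums.length + 1)).map (pref nums)) (i + ((nums.length - K : Nat) : Int)) 0
        - PySem.List.pyGetD ((List.range (nums.length + 1)).map (pref nums)) i 0) ∘ (fun (k : Nat) => (k : Int)))
      = (List.range (K + 1)).map (fun j => wsum nums (nums.length - K) j) := by
    refine List.map_congr_left (fun j hj => ?_)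
    have hj' : j < K + 1 := List.mem_range.mp hj
    simp only [Function.comp_apply]
    rw [show (j : Int) + ((nums.length - K : Nat) : Int) = ((j + (nums.length - K) : Nat) : Int) by push_cast; ring]
    rw [PySem.List.pyGetD_natCast, PySem.List.pyGetD_natCast]
    rw [PySem.List.getD_map_range (pref nums) _ _ 0 (by omega),
      PySem.List.getD_map_range (pref nums) _ _ 0 (by omega)]
    rfl
  rw [hlist]
  rw [List.range_succ_eq_map, List.map_cons, List.map_map]
  rw [show ((fun j => wsum nums (nums.length - K) j) ∘ Nat.succ) = (fun j => wsum nums (nums.length - K) (j + 1)) from by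
    funext j; simp [Function.comp, Nat.succ_eq_add_one]]
  rw [PySem.List.min?_id_cons]
  rw [runMin_fold]
  rw [PySem.List.pyGetD_neg_ofNat _ 1 0 (by omega) (by simp)]
  simp

-- ===== VERDICT (by name: the statement is the Claim_ definition above) =====
theorem solution_spec : Claim_equal_solution := by
  intro nums k _ hPre
  obtain ⟨hk0, hkn⟩ := hPre
  unfold Spec_solution
  obtain ⟨K, rfl⟩ : ∃ K : Nat, k = (K : Int) := ⟨k.toNat, (Int.toNat_of_nonneg hk0).symm⟩
  have hK : K ≤ nums.length := by exact_mod_cast hkn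
  rw [solution_eq nums K hK, solution_alt_eq nums K hK]
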